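-- pv_equiv track=rewrite | github.com/accarol/ATP2024 | TP7/app_tabMeteo.py | maxChuva
-- ===== SOURCE A (Python) =====
-- def maxChuva(tabMeteo):
--     max_prec = tabMeteo[0][3]
--     max_data = tabMeteo[0][0]
--     for data,tmin,tmax,precip in tabMeteo[1:]:
--         if precip > max_prec:
--             max_prec = precip
--             max_data = data
--     return (max_data, max_prec)
-- ===== SOURCE B (Python) =====
-- def maxChuva(tabMeteo):
--     best = sorted(tabMeteo, key=lambda r: r[3], reverse=True)[0]
--     return (best[0], best[3])
-- ===== Notes on version B (the rewrite author's own statement) =====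
-- stated objective: idiomatic
-- what changed: Replaces the hand-written running-max loop over tabMeteo[1:] with a stable descending sort by precipitation and taking the first row; stability with reverse=True makes the first occurrence of the maximum win, matching A's strict '>'.
import Mathlib
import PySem

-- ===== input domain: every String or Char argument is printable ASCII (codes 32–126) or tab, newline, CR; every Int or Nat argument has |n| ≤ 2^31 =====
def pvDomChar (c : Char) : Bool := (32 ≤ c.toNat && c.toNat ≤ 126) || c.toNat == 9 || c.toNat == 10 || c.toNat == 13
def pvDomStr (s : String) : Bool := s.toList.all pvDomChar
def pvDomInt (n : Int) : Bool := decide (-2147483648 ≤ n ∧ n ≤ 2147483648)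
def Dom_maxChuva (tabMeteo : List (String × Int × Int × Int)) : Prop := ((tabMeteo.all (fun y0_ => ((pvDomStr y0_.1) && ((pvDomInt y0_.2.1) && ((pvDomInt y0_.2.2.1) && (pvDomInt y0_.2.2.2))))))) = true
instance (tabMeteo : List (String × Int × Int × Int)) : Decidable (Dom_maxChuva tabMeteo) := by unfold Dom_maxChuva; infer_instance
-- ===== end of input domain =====

-- B replaces A's running-max loop with a stable descending sort by precipitation, taking the first row (idiomatic, same result).


-- ===== PORT A =====
-- literal port: tabMeteo[0] (raises on [], excluded by Pre_), then a running-max loop over tabMeteo[1:]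
def maxChuva (tabMeteo : List (String × Int × Int × Int)) : String × Int :=
  match tabMeteo with
  | [] => ("", 0)  -- tabMeteo[0] raises IndexError here; outside Pre_maxChuva
  | r0 :: _ =>
    let st := (PySem.List.slice tabMeteo (some 1) none).foldl
      (fun (st : String × Int) r => if r.2.2.2 > st.2 then (r.1, r.2.2.2) else st)
      (r0.1, r0.2.2.2)
    (st.1, st.2)

-- ===== PORT B =====
-- literal port of Source B: sorted(tabMeteo, key=lambda r: r[3], reverse=True)[0]
def maxChuva_alt (tabMeteo : List (String × Int × Int × Int)) : String × Int :=
  match PySem.List.pyGet? (PySem.List.sorted tabMeteo (fun r => r.2.2.2) true) 0 with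
  | some best => (best.1, best.2.2.2)
  | none => ("", 0)  -- [0] on the empty list raises IndexError; outside Pre_maxChuva

-- ===== PRECONDITION & SPEC =====
-- Pre_: both Pythons raise IndexError on the empty list.
def Pre_maxChuva (tabMeteo : List (String × Int × Int × Int)) : Prop := tabMeteo ≠ []
instance (tabMeteo : List (String × Int × Int × Int)) : Decidable (Pre_maxChuva tabMeteo) := by unfold Pre_maxChuva; infer_instance
def pvWitness_maxChuva : (List (String × Int × Int × Int)) := [("2024-01-01", 1, 5, 3), ("2024-01-02", 0, 4, 7)]

def Spec_maxChuva (tabMeteo : List (String × Int × Int × Int)) (out : String × Int) : Prop := out = maxChuva_alt tabMeteo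
instance (tabMeteo : List (String × Int × Int × Int)) (out : String × Int) : Decidable (Spec_maxChuva tabMeteo out) := by unfold Spec_maxChuva; infer_instance

-- ===== CLAIM (what is proved, stated in full; the proofs are below) =====
def Claim_equal_maxChuva : Prop := ∀ (tabMeteo : List (String × Int × Int × Int)), Dom_maxChuva tabMeteo → Pre_maxChuva tabMeteo → Spec_maxChuva tabMeteo (maxChuva tabMeteo)

-- ===== LEMMAS AND PROOFS =====

-- The head of the descending insertion-sort fold evolves exactly like a running max with strict '>':
-- inserting x in front of a nonempty accumulator replaces the head iff key(head) < key(x).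
theorem pv_head_foldl_insertBy {α κ : Type} [LinearOrder κ] (key : α → κ) :
    ∀ (rest : List α) (b : α) (t : List α),
      ∃ t', rest.foldl (fun acc x => PySem.List.insertBy (fun a c => decide (key c < key a)) x acc) (b :: t)
            = (rest.foldl (fun b r => if key b < key r then r else b) b) :: t' := by
  intro rest
  induction rest with
  | nil => intro b t; exact ⟨t, rfl⟩
  | cons r rest ih =>
    intro b t
    simp only [List.foldl_cons, PySem.List.insertBy]
    by_cases h : key b < key r
    · simpa [h] using ih r (b :: t)
    · simpa [h] using ih b (PySem.List.insertBy (fun a c => decide (key c < key a)) r t)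

-- A's (data, prec) state is the projection of a running max over whole rows.
theorem pv_state_proj :
    ∀ (rest : List (String × Int × Int × Int)) (b : String × Int × Int × Int),
      rest.foldl (fun (st : String × Int) r => if r.2.2.2 > st.2 then (r.1, r.2.2.2) else st) (b.1, b.2.2.2)
      = (let m := rest.foldl (fun b r => if b.2.2.2 < r.2.2.2 then r else b) b; (m.1, m.2.2.2)) := by
  intro rest
  induction rest with
  | nil => intro b; rfl
  | cons r rest ih =>
    intro b
    simp only [List.foldl_cons]
    by_cases h : r.2.2.2 > b.2.2.2
    · simpa [h, gt_iff_lt] using ih r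
    · have h' : ¬ b.2.2.2 < r.2.2.2 := h
      simpa [h, h'] using ih b

-- ===== VERDICT (by name: the statement is the Claim_ definition above) =====
theorem maxChuva_spec : Claim_equal_maxChuva := by
  intro tab _ hpre
  unfold Spec_maxChuva
  match tab with
  | [] => exact absurd rfl hpre
  | r0 :: rest =>
    have hslice : PySem.List.slice (r0 :: rest) (some 1) none = rest := by
      simpa using PySem.List.slice_from_natCast (r0 :: rest) 1
    have hsort :
        PySem.List.sorted (r0 :: rest) (fun r => r.2.2.2) true
          = List.foldl (fun acc x => PySem.List.insertBy (fun a c => decide (c.2.2.2 < a.2.2.2)) x acc) [] (r0 :: rest) :=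
      PySem.List.sorted_rev_eq_foldl_insertBy (r0 :: rest) (fun r => r.2.2.2)
    obtain ⟨t', ht'⟩ := pv_head_foldl_insertBy (fun r : String × Int × Int × Int => r.2.2.2) rest r0 []
    have hsort' :
        PySem.List.sorted (r0 :: rest) (fun r => r.2.2.2) true
          = (rest.foldl (fun b r => if b.2.2.2 < r.2.2.2 then r else b) r0) :: t' := by
      rw [hsort]
      simp only [List.foldl_cons, PySem.List.insertBy]
      exact ht'
    simp only [maxChuva, maxChuva_alt, hslice, hsort', PySem.List.pyGet?_zero_cons, pv_state_proj]
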